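-- pv_equiv track=rewrite | github.com/7riatsu/atcoder | abc166/b.py | solve
-- ===== SOURCE A (Python) =====
-- def solve(n, k, d_arr, arr):
--     ans = []
--     for _ in range(n):
--         ans.append(0)
--
--     for i in range(k):
--         ele = arr[i]
--         for j in arr[i]:
--             ans[j-1] += 1
--     return ans.count(0)
-- ===== SOURCE B (Python) =====
-- def solve(n, k, d_arr, arr):
--     vals = sorted(j for i in range(k) for j in arr[i])
--     distinct = 0
--     prev = None
--     for v in vals:
--         if v != prev:
--             distinct += 1
--             prev = v
--     return n - distinct
-- ===== Notes on version B (the rewrite author's own statement) =====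
-- stated objective: alternative
-- what changed: B replaces A's per-person count array (n appends, one increment per listed index, then a .count(0) zero scan) by flatten-sort-scan: it collects all listed indices, sorts them, counts distinct people in one adjacent-comparison pass, and returns n - distinct.
-- outside the precondition, e.g. on solve(2, 1, [5], [[0, 2]]): A returns 1, B returns 0; on solve(-1, 0, [0], []): A returns 0, B returns -1
import Mathlib
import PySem

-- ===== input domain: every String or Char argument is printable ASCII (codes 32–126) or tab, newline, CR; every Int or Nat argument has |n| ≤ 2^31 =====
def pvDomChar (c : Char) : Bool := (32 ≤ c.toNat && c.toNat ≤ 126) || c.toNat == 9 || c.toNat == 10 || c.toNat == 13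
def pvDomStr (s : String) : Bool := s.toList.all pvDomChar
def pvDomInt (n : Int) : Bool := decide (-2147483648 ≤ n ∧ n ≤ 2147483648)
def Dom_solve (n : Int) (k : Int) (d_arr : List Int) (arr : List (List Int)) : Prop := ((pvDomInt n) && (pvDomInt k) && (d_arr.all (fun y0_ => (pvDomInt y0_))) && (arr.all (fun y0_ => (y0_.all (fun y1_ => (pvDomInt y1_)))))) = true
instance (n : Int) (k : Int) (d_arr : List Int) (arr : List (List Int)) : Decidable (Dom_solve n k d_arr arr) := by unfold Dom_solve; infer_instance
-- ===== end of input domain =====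

-- B flattens the first k snack lists, sorts them, and counts distinct people by one adjacent-comparison
-- scan, returning n - distinct — instead of A's per-person count array plus a final zero scan (objective: alternative).

-- ===== PORT A =====
def solve (n : Int) (k : Int) (d_arr : List Int) (arr : List (List Int)) : Int :=
  let ans : List Int := (PySem.List.pyRange 0 n 1).foldl (fun a _ => a ++ [(0 : Int)]) []
  let ans := (PySem.List.pyRange 0 k 1).foldl (fun ans i =>
      (PySem.List.pyGetD arr i []).foldl
        (fun ans j => PySem.List.pySetD ans (j - 1) (PySem.List.pyGetD ans (j - 1) 0 + 1)) ans) ans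
  ((PySem.List.count ans 0 : Nat) : Int)

-- ===== PORT B =====
-- the loop body of B's scan: 'if v != prev: distinct += 1; prev = v'
def bStep (st : Int × Option Int) (v : Int) : Int × Option Int :=
  if some v ≠ st.2 then (st.1 + 1, some v) else st

def solve_alt (n : Int) (k : Int) (d_arr : List Int) (arr : List (List Int)) : Int :=
  let vals : List Int := PySem.List.sorted
    ((PySem.List.pyRange 0 k 1).foldl (fun acc i => acc ++ PySem.List.pyGetD arr i []) [])
    (fun x => x) false
  let st := vals.foldl bStep ((0 : Int), (none : Option Int))
  n - st.1

-- ===== PRECONDITION & SPEC =====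
-- Pre_ excludes (besides the inputs where A raises: a positive k beyond len(arr), or an index j with
-- j-1 outside Python's wraparound range) the out-of-spec corners where A still returns: a negative n,
-- and person indices j ≤ 0, where A's value comes from Python's accidental negative-index wraparound of
-- the count array — a corner no caller specifies, on which A's and B's values are both defensible.
def Pre_solve (n : Int) (k : Int) (d_arr : List Int) (arr : List (List Int)) : Prop :=
  0 ≤ n ∧ (0 < k → k ≤ (arr.length : Int)) ∧ ∀ lst ∈ arr.take k.toNat, ∀ j ∈ lst, 1 ≤ j ∧ j ≤ n
instance (n : Int) (k : Int) (d_arr : List Int) (arr : List (List Int)) : Decidable (Pre_solve n k d_arr arr) := by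
  unfold Pre_solve; infer_instance
def pvWitness_solve : Int × Int × List Int × List (List Int) := (3, 2, [10], [[3, 1], [1]])

def Spec_solve (n : Int) (k : Int) (d_arr : List Int) (arr : List (List Int)) (out : Int) : Prop := out = solve_alt n k d_arr arr
instance (n : Int) (k : Int) (d_arr : List Int) (arr : List (List Int)) (out : Int) : Decidable (Spec_solve n k d_arr arr out) := by unfold Spec_solve; infer_instance

-- ===== CLAIM (what is proved, stated in full; the proofs are below) =====
def Claim_equal_solve : Prop := ∀ (n : Int) (k : Int) (d_arr : List Int) (arr : List (List Int)), Dom_solve n k d_arr arr → Pre_solve n k d_arr arr → Spec_solve n k d_arr arr (solve n k d_arr arr)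

-- ===== LEMMAS AND PROOFS =====

-- the count array after recording the (in-range) indices of L, as a map over range n
def cntMap (n : Nat) (L : List Int) : List Int :=
  (List.range n).map (fun (i : Nat) => (L.count ((i : Int) + 1) : Int))

lemma init_eq_cntMap (n : Int) :
    (PySem.List.pyRange 0 n 1).foldl (fun a _ => a ++ [(0 : Int)]) [] = cntMap n.toNat [] := by
  have h := PySem.List.foldl_append_singleton_eq_map (l := PySem.List.pyRange 0 n 1)
    (f := fun _ => (0 : Int)) (acc := [])
  rw [h]
  simp [cntMap, PySem.List.pyRange_one, Function.comp_def, List.map_const']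

lemma countP_and_split {α : Type} (l : List α) (p q : α → Bool) :
    l.countP (fun x => p x && q x) + l.countP (fun x => p x && !q x) = l.countP p := by
  induction l with
  | nil => simp
  | cons x xs ih =>
    cases hp : p x <;> cases hq : q x <;> simp [hp, hq] <;> omega

lemma countP_range_eq_one (n : Nat) (j : Int) (h1 : 1 ≤ j) (h2 : j ≤ (n : Int)) :
    (List.range n).countP (fun (i : Nat) => decide ((i : Int) + 1 = j)) = 1 := by
  have hm : (j - 1).toNat < n := by omega
  have hcongr : (List.range n).countP (fun (i : Nat) => decide ((i : Int) + 1 = j))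
      = (List.range n).countP (fun i => i == (j - 1).toNat) := by
    apply List.countP_congr
    intro i hi
    simp only [List.mem_range] at hi
    simp only [decide_eq_true_eq, beq_iff_eq]
    omega
  rw [hcongr]
  have := List.count_eq_one_of_mem (List.nodup_range (n := n)) (List.mem_range.mpr hm)
  simpa [List.count] using this

lemma foldl_pyRange_take {β : Type} (arr : List (List Int)) (k : Int) (hk0 : 0 ≤ k)
    (hk : k ≤ (arr.length : Int)) (g : β → List Int → β) (init : β) :
    (PySem.List.pyRange 0 k 1).foldl (fun acc i => g acc (PySem.List.pyGetD arr i [])) init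
      = (arr.take k.toNat).foldl g init := by
  have hlen : ((arr.take k.toNat).length : Int) = k := by
    simp [List.length_take]; omega
  have h1 : (PySem.List.pyRange 0 k 1).foldl (fun acc i => g acc (PySem.List.pyGetD arr i [])) init
      = (PySem.List.pyRange 0 k 1).foldl (fun acc i => g acc (PySem.List.pyGetD (arr.take k.toNat) i [])) init := by
    apply PySem.List.foldl_congr_mem
    intro acc x hx
    rw [PySem.List.mem_pyRange_one] at hx
    have hx1 : (0:Int) ≤ x := hx.1
    have hx2 : x < k := hx.2
    rw [PySem.List.pyGetD_eq_getElem _ _ hx1 (by omega),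
        PySem.List.pyGetD_eq_getElem _ _ hx1 (by rw [hlen]; omega)]
    rw [List.getElem_take]
  rw [h1]
  have h2 := PySem.List.foldl_pyRange_zero_pyGetD' (arr.take k.toNat) [] g init
  rwa [hlen] at h2

-- zeros of the count array + number of distinct recorded people = n
lemma zeros_aux (n : Nat) (L : List Int) (h : ∀ j ∈ L, 1 ≤ j ∧ j ≤ (n : Int)) :
    (List.range n).countP (fun (i : Nat) => !decide (((i : Int) + 1) ∈ L)) + L.toFinset.card = n := by
  induction L using List.reverseRecOn with
  | nil => simp
  | append_singleton L j ih =>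
    have hL : ∀ x ∈ L, 1 ≤ x ∧ x ≤ (n : Int) := fun x hx => h x (by simp [hx])
    have hj := h j (by simp)
    have htf : (L ++ [j]).toFinset = insert j L.toFinset := by
      ext a; simp [or_comm]
    by_cases hmem : j ∈ L
    · have e : (List.range n).countP (fun (i : Nat) => !decide (((i : Int) + 1) ∈ L ++ [j]))
             = (List.range n).countP (fun (i : Nat) => !decide (((i : Int) + 1) ∈ L)) := by
        apply List.countP_congr
        intro x _
        simp only [Bool.not_eq_true', decide_eq_false_iff_not, List.mem_append, List.mem_singleton]
        constructor
        · intro hx hxL; exact hx (Or.inl hxL)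
        · intro hx hd; rcases hd with h1 | h2
          · exact hx h1
          · exact hx (h2 ▸ hmem)
      rw [e, htf, Finset.insert_eq_self.mpr (List.mem_toFinset.mpr hmem)]
      exact ih hL
    · have hsplit := countP_and_split (List.range n)
        (fun (i : Nat) => !decide (((i : Int) + 1) ∈ L))
        (fun (i : Nat) => !decide (((i : Int) + 1) = j))
      have e1 : (List.range n).countP (fun (i : Nat) => !decide (((i : Int) + 1) ∈ L ++ [j]))
              = (List.range n).countP (fun (i : Nat) =>
                  (!decide (((i : Int) + 1) ∈ L)) && (!decide (((i : Int) + 1) = j))) := by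
        apply List.countP_congr
        intro x _
        simp only [Bool.not_eq_true', decide_eq_false_iff_not, Bool.and_eq_true, List.mem_append,
          List.mem_singleton]
        tauto
      have e2 : (List.range n).countP (fun (i : Nat) =>
                  (!decide (((i : Int) + 1) ∈ L)) && !(!decide (((i : Int) + 1) = j))) = 1 := by
        have e3 : (List.range n).countP (fun (i : Nat) =>
                  (!decide (((i : Int) + 1) ∈ L)) && !(!decide (((i : Int) + 1) = j)))
                = (List.range n).countP (fun (i : Nat) => decide (((i : Int) + 1) = j)) := by
          apply List.countP_congr
          intro x _
          simp only [Bool.not_not, Bool.and_eq_true, Bool.not_eq_true', decide_eq_false_iff_not,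
            decide_eq_true_eq]
          constructor
          · intro hx; exact hx.2
          · intro hx; exact ⟨fun hxL => hmem (hx ▸ hxL), hx⟩
        rw [e3]
        exact countP_range_eq_one n j hj.1 hj.2
      rw [e1, htf, Finset.card_insert_of_notMem (fun hc => hmem (List.mem_toFinset.mp hc))]
      have hih := ih hL
      omega

-- one increment of the count array at an in-range index j
lemma set_bump_cntMap (n : Nat) (L : List Int) (w : Int) (hw1 : 1 ≤ w) (hw2 : w ≤ (n : Int)) :
    (cntMap n L).set (w - 1).toNat ((cntMap n L).getD (w - 1).toNat 0 + 1) = cntMap n (L ++ [w]) := by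
  have hlen : (cntMap n L).length = n := by simp [cntMap]
  have hmn : (w - 1).toNat < n := by omega
  have hg : (cntMap n L).getD (w - 1).toNat 0 = (cntMap n L)[(w - 1).toNat]'(by omega) :=
    (List.getElem_eq_getD (fallback := 0)).symm
  rw [hg]
  apply List.ext_getElem
  · simp [cntMap]
  · intro i hi1 hi2
    have hin : i < n := by simpa [hlen] using hi1
    simp only [cntMap, List.getElem_set, List.getElem_map, List.getElem_range]
    split_ifs with hc
    · subst hc
      have hj : (((w - 1).toNat : Nat) : Int) + 1 = w := by omega
      rw [hj, List.count_append]
      push_cast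
      simp
    · have hij : ¬ ((i : Int) + 1 = w) := by omega
      rw [List.count_append]
      simp [List.count_cons]
      omega

lemma bump_cntMap (n : Nat) (L : List Int) (j : Int) (h1 : 1 ≤ j) (h2 : j ≤ (n : Int)) :
    PySem.List.pySetD (cntMap n L) (j - 1) (PySem.List.pyGetD (cntMap n L) (j - 1) 0 + 1)
      = cntMap n (L ++ [j]) := by
  have hlen : (cntMap n L).length = n := by simp [cntMap]
  have h0 : (0 : Int) ≤ j - 1 := by omega
  have hlt : j - 1 < ((cntMap n L).length : Int) := by rw [hlen]; omega
  rw [PySem.List.pySetD_of_nonneg _ _ h0, PySem.List.pyGetD_eq_getElem _ _ h0 hlt,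
      List.getElem_eq_getD (fallback := 0)]
  exact set_bump_cntMap n L j h1 h2

lemma foldl_bump_cntMap (n : Nat) (js : List Int) (h : ∀ j ∈ js, 1 ≤ j ∧ j ≤ (n : Int)) :
    ∀ L, js.foldl (fun ans j => PySem.List.pySetD ans (j - 1) (PySem.List.pyGetD ans (j - 1) 0 + 1)) (cntMap n L)
      = cntMap n (L ++ js) := by
  induction js with
  | nil => simp
  | cons j js ih =>
    intro L
    have hj := h j (by simp)
    simp only [List.foldl_cons]
    rw [bump_cntMap n L j hj.1 hj.2]
    rw [ih (fun x hx => h x (by simp [hx])) (L ++ [j])]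
    simp

lemma foldl_lists_cntMap (n : Nat) (ls : List (List Int))
    (h : ∀ lst ∈ ls, ∀ j ∈ lst, 1 ≤ j ∧ j ≤ (n : Int)) :
    ∀ L, ls.foldl (fun ans lst =>
        lst.foldl (fun ans j => PySem.List.pySetD ans (j - 1) (PySem.List.pyGetD ans (j - 1) 0 + 1)) ans)
        (cntMap n L)
      = cntMap n (L ++ ls.flatten) := by
  induction ls with
  | nil => simp
  | cons lst ls ih =>
    intro L
    simp only [List.foldl_cons]
    rw [foldl_bump_cntMap n lst (h lst (by simp)) L]
    rw [ih (fun l hl => h l (by simp [hl])) (L ++ lst)]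
    simp

lemma count_zero_cntMap (n : Nat) (L : List Int) :
    List.count 0 (cntMap n L) = (List.range n).countP (fun (i : Nat) => !decide (((i : Int) + 1) ∈ L)) := by
  simp only [cntMap, List.count, List.countP_map]
  apply List.countP_congr
  intro x _
  simp [Function.comp]
  exact ⟨fun h hm => h _ hm rfl, fun h a hm ha => h (ha ▸ hm)⟩

-- evaluation of port A: solve = n - number of distinct listed people
lemma solve_eq (n k : Int) (d_arr : List Int) (arr : List (List Int))
    (hpre : Pre_solve n k d_arr arr) :
    solve n k d_arr arr = n - (((arr.take k.toNat).flatten.toFinset.card : Nat) : Int) := by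
  obtain ⟨hn, hk', hb⟩ := hpre
  have hnn : ((n.toNat : Nat) : Int) = n := Int.toNat_of_nonneg hn
  have hb' : ∀ lst ∈ arr.take k.toNat, ∀ j ∈ lst, 1 ≤ j ∧ j ≤ ((n.toNat : Nat) : Int) := by
    intro lst hl j hj; have := hb lst hl j hj; omega
  unfold solve
  dsimp only
  rw [init_eq_cntMap n]
  by_cases hk : k ≤ 0
  · have htk : k.toNat = 0 := by omega
    have hkr : PySem.List.pyRange 0 k 1 = [] := by
      rw [PySem.List.pyRange_one, show (k - 0).toNat = 0 by omega]
      simp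
    rw [hkr]
    simp only [List.foldl_nil, htk, List.take_zero, List.flatten_nil]
    have hz := zeros_aux n.toNat [] (by intro j hj; simp at hj)
    rw [PySem.List.count_eq, count_zero_cntMap]
    simp only [List.toFinset_nil, Finset.card_empty] at hz ⊢
    omega
  · replace hk : 0 < k := by omega
    rw [foldl_pyRange_take arr k (le_of_lt hk) (hk' hk)
        (fun ans lst => lst.foldl
          (fun ans j => PySem.List.pySetD ans (j - 1) (PySem.List.pyGetD ans (j - 1) 0 + 1)) ans)
        (cntMap n.toNat []),
      foldl_lists_cntMap n.toNat (arr.take k.toNat) hb' []]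
    rw [List.nil_append, PySem.List.count_eq, count_zero_cntMap]
    set L := (arr.take k.toNat).flatten with hLdef
    have hball : ∀ j ∈ L, 1 ≤ j ∧ j ≤ ((n.toNat : Nat) : Int) := by
      intro j hj
      rw [hLdef, List.mem_flatten] at hj
      obtain ⟨l, hl, hjl⟩ := hj
      exact hb' l hl j hjl
    have hz := zeros_aux n.toNat L hball
    omega

-- B's flatten loop builds the concatenation of the first k lists
lemma foldl_append_flatten (ls : List (List Int)) :
    ∀ acc : List Int, ls.foldl (fun a l => a ++ l) acc = acc ++ ls.flatten := by
  induction ls with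
  | nil => simp
  | cons l ls ih => intro acc; simp [ih]

-- B's scan over a sorted tail, with prev = some p and p below every element
lemma scan_some (l : List Int) :
    ∀ (c : Int) (p : Int), l.Pairwise (· ≤ ·) → (∀ y ∈ l, p ≤ y) →
      (l.foldl bStep (c, some p)).1 = c + (((l.toFinset.erase p).card : Nat) : Int) := by
  induction l with
  | nil => intro c p _ _; simp
  | cons x xs ih =>
    intro c p hp hlow
    have hx_le : ∀ y ∈ xs, x ≤ y := (List.pairwise_cons.mp hp).1
    have hxs : xs.Pairwise (· ≤ ·) := (List.pairwise_cons.mp hp).2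
    have hpx : p ≤ x := hlow x (by simp)
    simp only [List.foldl_cons, bStep, ne_eq, Option.some.injEq]
    by_cases hxp : x = p
    · subst hxp
      rw [if_neg (not_not_intro rfl)]
      rw [ih c x hxs hx_le]
      congr 2
      rw [List.toFinset_cons, Finset.erase_insert_eq_erase]
    · have hpnot : p ∉ (x :: xs).toFinset := by
        simp only [List.toFinset_cons, Finset.mem_insert, List.mem_toFinset]
        rintro (h | h)
        · exact hxp h.symm
        · have := hx_le p h
          have hplt : p < x := lt_of_le_of_ne hpx (fun h2 => hxp h2.symm)
          omega
      rw [if_pos hxp]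
      rw [ih (c + 1) x hxs hx_le]
      rw [Finset.erase_eq_of_notMem hpnot]
      have hxmem : x ∈ (x :: xs).toFinset := by simp
      have hcard := Finset.card_erase_add_one hxmem
      rw [List.toFinset_cons, Finset.erase_insert_eq_erase] at hcard
      rw [List.toFinset_cons]
      omega

-- B's scan over a whole sorted list counts its distinct elements
lemma scan_none (l : List Int) (c : Int) (hl : l.Pairwise (· ≤ ·)) :
    (l.foldl bStep (c, none)).1 = c + ((l.toFinset.card : Nat) : Int) := by
  cases l with
  | nil => simp
  | cons x xs =>
    have hx_le : ∀ y ∈ xs, x ≤ y := (List.pairwise_cons.mp hl).1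
    have hxs : xs.Pairwise (· ≤ ·) := (List.pairwise_cons.mp hl).2
    simp only [List.foldl_cons, bStep, ne_eq]
    rw [if_pos (Option.some_ne_none x)]
    rw [scan_some xs (c + 1) x hxs hx_le]
    have hxmem : x ∈ (x :: xs).toFinset := by simp
    have hcard := Finset.card_erase_add_one hxmem
    rw [List.toFinset_cons, Finset.erase_insert_eq_erase] at hcard
    rw [List.toFinset_cons]
    omega

-- evaluation of port B: solve_alt = n - number of distinct listed people
lemma solve_alt_eq (n k : Int) (d_arr : List Int) (arr : List (List Int))
    (hpre : Pre_solve n k d_arr arr) :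
    solve_alt n k d_arr arr = n - (((arr.take k.toNat).flatten.toFinset.card : Nat) : Int) := by
  obtain ⟨_, hk', _⟩ := hpre
  unfold solve_alt
  dsimp only
  have hflat : (PySem.List.pyRange 0 k 1).foldl (fun acc i => acc ++ PySem.List.pyGetD arr i []) []
      = (arr.take k.toNat).flatten := by
    by_cases hk : k ≤ 0
    · have htk : k.toNat = 0 := by omega
      have hkr : PySem.List.pyRange 0 k 1 = [] := by
        rw [PySem.List.pyRange_one, show (k - 0).toNat = 0 by omega]
        simp
      rw [hkr, htk]
      simp
    · replace hk : 0 < k := by omega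
      rw [foldl_pyRange_take arr k (le_of_lt hk) (hk' hk) (fun a l => a ++ l) [],
          foldl_append_flatten]
      simp
  rw [hflat]
  set F := (arr.take k.toNat).flatten with hF
  have hperm : (PySem.List.sorted F (fun x => x) false).Perm F := PySem.List.sorted_perm F _ _
  have hpw : (PySem.List.sorted F (fun x => x) false).Pairwise (· ≤ ·) := by
    have := PySem.List.sorted_pairwise F (fun x => x)
    simpa using this
  rw [scan_none _ 0 hpw, List.toFinset_eq_of_perm _ _ hperm]
  omega

-- ===== VERDICT (by name: the statement is the Claim_ definition above) =====
theorem solve_spec : Claim_equal_solve := by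
  intro n k d_arr arr _hdom hpre
  unfold Spec_solve
  rw [solve_eq n k d_arr arr hpre, solve_alt_eq n k d_arr arr hpre]
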